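-- pv_equiv track=rewrite | github.com/AI-Empower-HQ-360/AI-Video-Generator-main | backend/services/video_service.py | _recreate_subtitle_file
-- ===== SOURCE A (Python) =====
-- from typing import Dict, Any, List, Optional, Union, Tuple
--
-- def _recreate_subtitle_file(original_content: str, translated_texts: List[str]) -> str:
--     """Recreate subtitle file with translated texts"""
--     lines = original_content.split('\n')
--     translated_content = []
--     text_index = 0
--
--     for line in lines:
--         line_stripped = line.strip()
--         # Keep sequence numbers and timestamps, replace text
--         if line_stripped and not line_stripped.isdigit() and '-->' not in line_stripped:
--             if text_index < len(translated_texts):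
--                 translated_content.append(translated_texts[text_index])
--                 text_index += 1
--             else:
--                 translated_content.append(line)
--         else:
--             translated_content.append(line)
--
--     return '\n'.join(translated_content)
-- ===== SOURCE B (Python) =====
-- def _recreate_subtitle_file(original_content, translated_texts):
--     """Recreate subtitle file with translated texts (table-then-scatter)."""
--     lines = original_content.split('\n')
--     positions = [i for i, line in enumerate(lines)
--                  if line.strip() and not line.strip().isdigit()
--                  and '-->' not in line.strip()]
--     result = list(lines)
--     for text, idx in zip(translated_texts, positions):
--         result[idx] = text
--     return '\n'.join(result)
-- ===== Notes on version B (the rewrite author's own statement) =====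
-- stated objective: alternative
-- what changed: Replaces A's single pass with a running text_index counter by a two-phase table-then-scatter: first collect the indices of text lines, then copy the lines and overwrite those indices via zip with the translations.
import Mathlib
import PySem

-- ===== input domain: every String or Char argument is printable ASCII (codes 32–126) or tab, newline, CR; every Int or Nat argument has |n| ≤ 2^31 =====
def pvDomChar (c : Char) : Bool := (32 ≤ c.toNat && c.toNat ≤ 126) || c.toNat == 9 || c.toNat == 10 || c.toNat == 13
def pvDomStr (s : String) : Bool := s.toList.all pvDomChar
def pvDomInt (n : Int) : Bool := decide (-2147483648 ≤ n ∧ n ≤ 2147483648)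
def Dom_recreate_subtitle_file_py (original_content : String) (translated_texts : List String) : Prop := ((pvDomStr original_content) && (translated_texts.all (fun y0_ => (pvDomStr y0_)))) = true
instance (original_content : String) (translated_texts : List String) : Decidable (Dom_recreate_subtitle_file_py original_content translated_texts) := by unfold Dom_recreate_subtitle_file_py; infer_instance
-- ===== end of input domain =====

-- B replaces A's single replace-as-you-go pass (running text_index counter) by a
-- two-phase table-then-scatter: collect the indices of text lines, then overwrite
-- them in a copy of the lines via zip with the translations (objective: alternative).

-- shared line classifier: `line.strip() and not line.strip().isdigit() and '-->' not in line.strip()`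
def pvCond (line : String) : Bool :=
  let ls := PySem.Str.strip line
  !(ls == "") && !PySem.Str.strIsdigit ls && !PySem.Str.isIn "-->" ls

-- ===== PORT A =====
def recreate_subtitle_file_py (original_content : String) (translated_texts : List String) : String :=
  let lines := (PySem.Str.split? original_content "\n").getD []
  let st := lines.foldl (fun (st : List String × Nat) line =>
      if pvCond line then
        if st.2 < translated_texts.length then
          (st.1 ++ [PySem.List.pyGetD translated_texts (st.2 : Int) ""], st.2 + 1)
        else (st.1 ++ [line], st.2)
      else (st.1 ++ [line], st.2)) ([], 0)
  PySem.Str.join "\n" st.1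

-- ===== PORT B =====
def recreate_subtitle_file_py_alt (original_content : String) (translated_texts : List String) : String :=
  let lines := (PySem.Str.split? original_content "\n").getD []
  let positions := ((PySem.List.enumerate lines 0).filter (fun p => pvCond p.2)).map (fun p => p.1)
  let result := (translated_texts.zip positions).foldl
      (fun res p => PySem.List.pySetD res p.2 p.1) lines
  PySem.Str.join "\n" result

-- ===== PRECONDITION & SPEC =====
def Spec_recreate_subtitle_file_py (original_content : String) (translated_texts : List String) (out : String) : Prop := out = recreate_subtitle_file_py_alt original_content translated_texts
instance (original_content : String) (translated_texts : List String) (out : String) : Decidable (Spec_recreate_subtitle_file_py original_content translated_texts out) := by unfold Spec_recreate_subtitle_file_py; infer_instance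

-- ===== CLAIM (what is proved, stated in full; the proofs are below) =====
def Claim_equal_recreate_subtitle_file_py : Prop := ∀ (original_content : String) (translated_texts : List String), Dom_recreate_subtitle_file_py original_content translated_texts → Spec_recreate_subtitle_file_py original_content translated_texts (recreate_subtitle_file_py original_content translated_texts)

-- ===== LEMMAS AND PROOFS =====

-- split on a nonempty separator: exactly Python's s.split('\n') (split? is some for sep ≠ "")

-- canonical recursive description of the result line list
def pvSpec : List String → List String → List String
  | [], _ => []
  | l :: rest, ts =>
    if pvCond l then
      match ts with
      | [] => l :: pvSpec rest []
      | t :: ts' => t :: pvSpec rest ts'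
    else l :: pvSpec rest ts

theorem pvSpec_nil (lines : List String) : pvSpec lines [] = lines := by
  induction lines with
  | nil => rfl
  | cons l rest ih => simp only [pvSpec, ih]; split <;> rfl

def pvPos (lines : List String) (s : Int) : List Int :=
  ((PySem.List.enumerate lines s).filter (fun p => pvCond p.2)).map (fun p => p.1)

theorem pvPos_cons (l : String) (rest : List String) (s : Int) :
    pvPos (l :: rest) s = if pvCond l then s :: pvPos rest (s + 1) else pvPos rest (s + 1) := by
  simp only [pvPos, PySem.List.enumerate_cons, List.filter_cons]
  split <;> simp

theorem pvPos_shift (lines : List String) : ∀ s : Int,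
    pvPos lines (s + 1) = (pvPos lines s).map (· + 1) := by
  induction lines with
  | nil => intro s; simp [pvPos]
  | cons l rest ih =>
    intro s
    rw [pvPos_cons, pvPos_cons]
    split <;> simp [ih (s + 1), ih s]

theorem pvPos_nonneg (lines : List String) : ∀ (s i : Int), i ∈ pvPos lines s → s ≤ i := by
  induction lines with
  | nil => intro s i h; simp [pvPos] at h
  | cons l rest ih =>
    intro s i h
    rw [pvPos_cons] at h
    split at h
    · rcases List.mem_cons.1 h with h | h
      · omega
      · have := ih (s + 1) i h; omega
    · have := ih (s + 1) i h; omega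

theorem pvScatter_cons (ts : List String) : ∀ (ps : List Int) (head : String) (res : List String),
    (∀ i ∈ ps, 0 ≤ i) →
    ((ts.zip (ps.map (· + 1))).foldl (fun res p => PySem.List.pySetD res p.2 p.1) (head :: res))
      = head :: (ts.zip ps).foldl (fun res p => PySem.List.pySetD res p.2 p.1) res := by
  induction ts with
  | nil => intro ps head res _; simp
  | cons t ts' ih =>
    intro ps head res hps
    cases ps with
    | nil => simp
    | cons i ps' =>
      have hi : (0 : Int) ≤ i := hps i (List.mem_cons_self ..)
      have hset : PySem.List.pySetD (head :: res) (i + 1) t = head :: PySem.List.pySetD res i t := by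
        rw [PySem.List.pySetD_of_nonneg _ _ (by omega), PySem.List.pySetD_of_nonneg _ _ hi]
        have h1 : (i + 1).toNat = i.toNat + 1 := by omega
        rw [h1]
        rfl
      simp only [List.map_cons, List.zip_cons_cons, List.foldl_cons, hset]
      exact ih ps' head (PySem.List.pySetD res i t) (fun j hj => hps j (List.mem_cons_of_mem _ hj))

theorem pvScatter_eq_spec (lines : List String) : ∀ ts : List String,
    (ts.zip (pvPos lines 0)).foldl (fun res p => PySem.List.pySetD res p.2 p.1) lines
      = pvSpec lines ts := by
  induction lines with
  | nil => intro ts; simp [pvPos, pvSpec]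
  | cons l rest ih =>
    intro ts
    rw [pvPos_cons]
    have hshift : pvPos rest (0 + 1) = (pvPos rest 0).map (· + 1) := pvPos_shift rest 0
    by_cases hc : pvCond l
    · rw [if_pos hc]
      cases ts with
      | nil => simp [pvSpec, hc, pvSpec_nil]
      | cons t ts' =>
        simp only [List.zip_cons_cons, List.foldl_cons]
        have h0 : PySem.List.pySetD (l :: rest) 0 t = t :: rest := by
          rw [PySem.List.pySetD_of_nonneg _ _ (by omega)]; rfl
        rw [h0, hshift, pvScatter_cons ts' (pvPos rest 0) t rest
              (fun i hi => pvPos_nonneg rest 0 i hi), ih ts']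
        simp [pvSpec, hc]
    · rw [if_neg hc, hshift, pvScatter_cons ts (pvPos rest 0) l rest
            (fun i hi => pvPos_nonneg rest 0 i hi), ih ts]
      simp [pvSpec, hc]

theorem pvFoldA_eq_spec (ts : List String) (lines : List String) :
    ∀ (acc : List String) (k : Nat), k ≤ ts.length →
    (lines.foldl (fun (st : List String × Nat) line =>
      if pvCond line then
        if st.2 < ts.length then
          (st.1 ++ [PySem.List.pyGetD ts (st.2 : Int) ""], st.2 + 1)
        else (st.1 ++ [line], st.2)
      else (st.1 ++ [line], st.2)) (acc, k)).1 = acc ++ pvSpec lines (ts.drop k) := by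
  induction lines with
  | nil => intro acc k _; simp [pvSpec]
  | cons l rest ih =>
    intro acc k hk
    simp only [List.foldl_cons]
    by_cases hc : pvCond l
    · by_cases hlt : k < ts.length
      · rw [if_pos hc, if_pos hlt, ih (acc ++ [PySem.List.pyGetD ts (k : Int) ""]) (k + 1) (by omega)]
        have hdrop : ts.drop k = ts[k] :: ts.drop (k + 1) := List.drop_eq_getElem_cons hlt
        have hget : PySem.List.pyGetD ts (k : Int) "" = ts[k] := by
          rw [PySem.List.pyGetD_natCast]; exact List.getD_eq_getElem _ _ hlt
        rw [hdrop, hget]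
        simp [pvSpec, hc]
      · rw [if_pos hc, if_neg hlt, ih (acc ++ [l]) k hk]
        have hdrop : ts.drop k = [] := by
          have : k = ts.length := by omega
          simp [this]
        rw [hdrop]
        simp [pvSpec, hc, pvSpec_nil]
    · rw [if_neg hc, ih (acc ++ [l]) k hk]
      simp [pvSpec, hc]

-- ===== VERDICT (by name: the statement is the Claim_ definition above) =====
theorem recreate_subtitle_file_py_spec : Claim_equal_recreate_subtitle_file_py := by
  intro oc ts _
  unfold Spec_recreate_subtitle_file_py recreate_subtitle_file_py recreate_subtitle_file_py_alt
  have hA := pvFoldA_eq_spec ts ((PySem.Str.split? oc "\n").getD []) [] 0 (by omega)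
  have hB := pvScatter_eq_spec ((PySem.Str.split? oc "\n").getD []) ts
  simp only [List.drop_zero, List.nil_append] at hA
  simp only [pvPos] at hB
  simp only [hA, hB]
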